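-- pv_equiv track=rewrite | github.com/cyberman/micropython-amiga-port | ports/amiga/samples/webserver.py | split_url_segments
-- ===== SOURCE A (Python) =====
-- def url_decode(s):
--     """Decode %xx and '+' in URL paths."""
--     if "%" not in s and "+" not in s:
--         return s
--     out = []
--     i = 0
--     n = len(s)
--     while i < n:
--         c = s[i]
--         if c == "+":
--             out.append(" ")
--             i += 1
--         elif c == "%" and i + 2 < n:
--             try:
--                 out.append(chr(int(s[i + 1:i + 3], 16)))
--                 i += 3
--             except ValueError:
--                 out.append(c)
--                 i += 1
--         else:
--             out.append(c)
--             i += 1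
--     return "".join(out)
--
-- def split_url_segments(url_path):
--     """
--     Split a URL path like '/foo/bar/baz.txt' into ['foo','bar','baz.txt'].
--     Rejects '..' and empty/'.' segments. Returns None on invalid path.
--     """
--     # Strip query string
--     q = url_path.find("?")
--     if q >= 0:
--         url_path = url_path[:q]
--     raw = url_path.split("/")
--     out = []
--     for seg in raw:
--         if seg == "" or seg == ".":
--             continue
--         if seg == "..":
--             return None  # forbidden
--         out.append(url_decode(seg))
--     return out
-- ===== SOURCE B (Python) =====
-- def _decode_segment(s):
--     # Delimiter-driven decoder: split on '%'; the first piece is literal,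
--     # every later fragment begins right after a '%'.
--     parts = s.split("%")
--     out = [parts[0].replace("+", " ")]
--     for p in parts[1:]:
--         if len(p) >= 2:
--             try:
--                 out.append(chr(int(p[:2], 16)) + p[2:].replace("+", " "))
--                 continue
--             except ValueError:
--                 pass
--         out.append("%" + p.replace("+", " "))
--     return "".join(out)
--
-- def split_url_segments(url_path):
--     path = url_path.split("?")[0]
--     segs = [seg for seg in path.split("/") if seg not in ("", ".")]
--     if ".." in segs:
--         return None
--     return [_decode_segment(seg) for seg in segs]
-- ===== Notes on version B (the rewrite author's own statement) =====
-- stated objective: alternative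
-- what changed: url_decode's index-driven character scan with manual lookahead is replaced by splitting the segment on '%' and decoding each fragment locally (first two chars as a hex byte, else kept literal), and the segment loop with early return becomes a comprehension filter plus a '..' membership test.
import Mathlib
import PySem

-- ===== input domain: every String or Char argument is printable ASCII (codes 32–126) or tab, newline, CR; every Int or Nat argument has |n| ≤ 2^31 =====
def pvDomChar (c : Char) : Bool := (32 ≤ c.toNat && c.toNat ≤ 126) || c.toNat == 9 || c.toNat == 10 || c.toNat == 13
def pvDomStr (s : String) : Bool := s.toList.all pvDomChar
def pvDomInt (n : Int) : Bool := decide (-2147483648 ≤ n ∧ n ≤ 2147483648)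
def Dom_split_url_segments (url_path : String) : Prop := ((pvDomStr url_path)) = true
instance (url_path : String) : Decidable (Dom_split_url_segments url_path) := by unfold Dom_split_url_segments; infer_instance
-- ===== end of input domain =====

-- B rewrites url_decode as split-on-'%' plus per-fragment decoding, and the segment loop as a
-- filter / '..'-membership / map pipeline; same return values, no speed claim.

-- ===== PORT A =====

-- chr(int([a,b],16)) with both Python errors as none: int's ValueError (the two chars are not a
-- base-16 int) and chr's ValueError (negative value, e.g. "-f").  Two-char base-16 values are at
-- most 255, so Char.ofNat is exactly chr on the non-negative results.  (Used by both ports: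
-- A applies it to s[i+1:i+3], B to p[:2].)
def hexByte? (a b : Char) : Option Char :=
  match PySem.Int.ofCharsBase? [a, b] 16 with
  | none => none
  | some v => if 0 ≤ v then some (Char.ofNat v.toNat) else none

-- the `while i < n` scan of url_decode: position i is the list head, i+1/i+2 the lookahead;
-- `i + 2 < n` is `rest` having at least two chars
def udLoopA : List Char → List Char
  | [] => []
  | c :: rest =>
    if c = '+' then ' ' :: udLoopA rest
    else if c = '%' then
      match hr : rest with
      | a :: b :: rest2 =>
        match hexByte? a b with
        | some ch => ch :: udLoopA rest2
        | none => '%' :: udLoopA rest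
      | _ => '%' :: udLoopA rest
    else c :: udLoopA rest
termination_by cs => cs.length
decreasing_by all_goals (subst_vars; simp [List.length_cons]; try omega)

-- url_decode with its `"%" not in s and "+" not in s` fast path
def url_decodeA (cs : List Char) : List Char :=
  if !(PySem.Chars.isIn ['%'] cs) && !(PySem.Chars.isIn ['+'] cs) then cs
  else udLoopA cs

-- the `for seg in raw` loop with its early `return None`
def segLoopA : List (List Char) → List String → Option (List String)
  | [], out => some out
  | seg :: rest, out =>
    if seg = [] ∨ seg = ['.'] then segLoopA rest out
    else if seg = ['.', '.'] then none
    else segLoopA rest (out ++ [String.ofList (url_decodeA seg)])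

def split_url_segments (url_path : String) : Option (List String) :=
  let cs := url_path.toList
  let q := PySem.Chars.find cs ['?']                              -- url_path.find("?")
  let cs1 := if 0 ≤ q then PySem.Chars.slice cs none (some q) else cs  -- url_path[:q]
  segLoopA (PySem.Chars.splitOn cs1 ['/']) []                     -- url_path.split("/")

-- ===== PORT B =====

-- p.replace("+", " ")
def plusToSpace (cs : List Char) : List Char := PySem.Chars.replace cs ['+'] [' ']

-- the body of B's `for p in parts[1:]` loop: a fragment of length ≥ 2 whose first two chars
-- parse as a hex byte decodes; anything else stays literal with its '%' restored
def decFragB (p : List Char) : List Char :=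
  match p with
  | a :: b :: rest =>
    match hexByte? a b with
    | some ch => ch :: plusToSpace rest
    | none => '%' :: plusToSpace p
  | _ => '%' :: plusToSpace p

-- _decode_segment: s.split("%"); the first piece is literal, later fragments via decFragB; join
def url_decodeB (cs : List Char) : List Char :=
  match PySem.Chars.splitOn cs ['%'] with
  | [] => []  -- unreachable: split never returns an empty list
  | first :: parts => plusToSpace first ++ parts.flatMap decFragB

def split_url_segments_alt (url_path : String) : Option (List String) :=
  let path := (PySem.Chars.splitOn url_path.toList ['?']).headI   -- url_path.split("?")[0]
  let segs := (PySem.Chars.splitOn path ['/']).filter (fun seg => !decide (seg = [] ∨ seg = ['.']))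
  if ['.', '.'] ∈ segs then none
  else some (segs.map (fun seg => String.ofList (url_decodeB seg)))

-- ===== PRECONDITION & SPEC =====
def Spec_split_url_segments (url_path : String) (out : Option (List String)) : Prop := out = split_url_segments_alt url_path
instance (url_path : String) (out : Option (List String)) : Decidable (Spec_split_url_segments url_path out) := by unfold Spec_split_url_segments; infer_instance

-- ===== CLAIM (what is proved, stated in full; the proofs are below) =====
def Claim_equal_split_url_segments : Prop := ∀ (url_path : String), Dom_split_url_segments url_path → Spec_split_url_segments url_path (split_url_segments url_path)

-- ===== LEMMAS AND PROOFS =====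

def splitCh (d : Char) : List Char → List (List Char)
  | [] => [[]]
  | c :: rest =>
    if c = d then [] :: splitCh d rest
    else
      match splitCh d rest with
      | h :: t => (c :: h) :: t
      | [] => [[c]]

theorem splitCh_ne_nil (d : Char) (cs : List Char) : splitCh d cs ≠ [] := by
  induction cs with
  | nil => simp [splitCh]
  | cons c rest ih =>
    simp only [splitCh]
    split
    · simp
    · rcases h : splitCh d rest with _ | ⟨h1, t⟩ <;> simp

theorem splitOn_go_spec (d : Char) (fuel : Nat) (l cur : List Char) (acc : List (List Char))
    (h : l.length ≤ fuel) :
    PySem.Chars.splitOn.go [d] fuel l cur acc =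
      acc.reverse ++ (match splitCh d l with
        | h :: t => (cur.reverse ++ h) :: t
        | [] => []) := by
  induction fuel generalizing l cur acc with
  | zero =>
    have : l = [] := by simpa using List.length_eq_zero_iff.mp (Nat.le_zero.mp h)
    subst this
    simp [PySem.Chars.splitOn.go, splitCh]
  | succ f ih =>
    cases l with
    | nil => simp [PySem.Chars.splitOn.go, splitCh]
    | cons c rest =>
      have hlen : rest.length ≤ f := by simpa using h
      by_cases hc : c = d
      · subst hc
        rw [PySem.Chars.splitOn.go]
        have hpre : [c].isPrefixOf (c :: rest) = true := by simp [List.isPrefixOf]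
        simp only [hpre, if_true, List.length_cons, List.length_nil, List.drop_succ_cons, List.drop_zero]
        rw [ih rest [] (cur.reverse :: acc) hlen]
        rcases hs : splitCh c rest with _ | ⟨h1, t⟩
        · exact absurd hs (splitCh_ne_nil c rest)
        · simp [splitCh, hs]
      · rw [PySem.Chars.splitOn.go]
        have hpre : [d].isPrefixOf (c :: rest) = false := by simpa [List.isPrefixOf] using fun h => hc h.symm
        simp only [hpre, if_false, Bool.false_eq_true]
        rw [ih rest (c :: cur) acc hlen]
        rcases hs : splitCh d rest with _ | ⟨h1, t⟩
        · exact absurd hs (splitCh_ne_nil d rest)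
        · simp [splitCh, hs, hc]

theorem splitOn_singleton (d : Char) (cs : List Char) :
    PySem.Chars.splitOn cs [d] = splitCh d cs := by
  rw [PySem.Chars.splitOn, splitOn_go_spec d (cs.length + 1) cs [] [] (by omega)]
  rcases hs : splitCh d cs with _ | ⟨h1, t⟩
  · exact absurd hs (splitCh_ne_nil d cs)
  · simp

theorem replace_go_spec (o n : Char) (fuel : Nat) (l acc : List Char) (h : l.length ≤ fuel) :
    PySem.Chars.replace.go [o] [n] fuel l acc =
      acc.reverse ++ l.map (fun c => if c = o then n else c) := by
  induction fuel generalizing l acc with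
  | zero =>
    have : l = [] := by simpa using List.length_eq_zero_iff.mp (Nat.le_zero.mp h)
    subst this
    simp [PySem.Chars.replace.go]
  | succ f ih =>
    cases l with
    | nil => simp [PySem.Chars.replace.go]
    | cons c rest =>
      have hlen : rest.length ≤ f := by simpa using h
      by_cases hc : c = o
      · subst hc
        rw [PySem.Chars.replace.go]
        have hpre : [c].isPrefixOf (c :: rest) = true := by simp [List.isPrefixOf]
        simp only [hpre, if_true, List.length_cons, List.length_nil, List.drop_succ_cons, List.drop_zero]
        rw [ih rest ([n].reverse ++ acc) hlen]
        simp
      · rw [PySem.Chars.replace.go]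
        have hpre : [o].isPrefixOf (c :: rest) = false := by
          simpa [List.isPrefixOf] using fun h => hc h.symm
        simp only [hpre, Bool.false_eq_true, if_false]
        rw [ih rest (c :: acc) hlen]
        simp [hc]

theorem plusToSpace_eq_map (cs : List Char) :
    PySem.Chars.replace cs ['+'] [' '] = cs.map (fun c => if c = '+' then ' ' else c) := by
  rw [PySem.Chars.replace]
  simp only [List.isEmpty_cons, Bool.false_eq_true, if_false]
  exact replace_go_spec '+' ' ' cs.length cs [] le_rfl

theorem mem_splitCh (d : Char) (cs p : List Char) (hp : p ∈ splitCh d cs) (c : Char)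
    (hc : c ∈ p) : c ∈ cs := by
  induction cs generalizing p with
  | nil => simp [splitCh] at hp; simp [hp] at hc
  | cons x rest ih =>
    simp only [splitCh] at hp
    split at hp
    · rcases List.mem_cons.mp hp with rfl | hmem
      · simp at hc
      · exact List.mem_cons_of_mem _ (ih p hmem hc)
    · rcases hs : splitCh d rest with _ | ⟨h1, t⟩
      · exact absurd hs (splitCh_ne_nil d rest)
      · rw [hs] at hp
        rcases List.mem_cons.mp hp with rfl | hmem
        · rcases List.mem_cons.mp hc with rfl | hc2
          · exact List.mem_cons_self ..
          · exact List.mem_cons_of_mem _ (ih h1 (by simp [hs]) hc2)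
        · exact List.mem_cons_of_mem _ (ih p (by simp [hs, hmem]) hc)

set_option maxRecDepth 40000 in
theorem hex_pct_ascii : ∀ n : Nat, n < 128 → ∀ m : Nat, m < 128 →
    PySem.Int.ofCharsBase? [Char.ofNat n, '%'] 16 = none ∧
    PySem.Int.ofCharsBase? ['%', Char.ofNat m] 16 = none := by decide

theorem dom_lt_128 (c : Char) (h : pvDomChar c = true) : c.toNat < 128 := by
  simp [pvDomChar] at h
  omega

theorem hexByte?_pct_right (a : Char) (ha : a.toNat < 128) : hexByte? a '%' = none := by
  have := (hex_pct_ascii a.toNat ha 0 (by omega)).1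
  rw [Char.ofNat_toNat] at this
  simp [hexByte?, this]

theorem hexByte?_pct_left (b : Char) (hb : b.toNat < 128) : hexByte? '%' b = none := by
  have := (hex_pct_ascii 0 (by omega) b.toNat hb).2
  rw [Char.ofNat_toNat] at this
  simp [hexByte?, this]

theorem singleton_infix_iff (d : Char) (cs : List Char) : [d] <:+: cs ↔ d ∈ cs := by
  constructor
  · rintro ⟨s, t, rfl⟩; simp
  · intro h
    rcases List.append_of_mem h with ⟨s, t, rfl⟩
    exact ⟨s, t, by simp⟩

theorem splitCh_headI_takeWhile (d : Char) (cs : List Char) :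
    (splitCh d cs).headI = cs.takeWhile (fun c => !decide (c = d)) := by
  induction cs with
  | nil => simp [splitCh]
  | cons c rest ih =>
    simp only [splitCh]
    split
    · simp_all [List.takeWhile_cons]
    · rcases hs : splitCh d rest with _ | ⟨h1, t⟩
      · exact absurd hs (splitCh_ne_nil d rest)
      · simp_all [List.takeWhile_cons]

theorem takeWhile_eq_take (d : Char) (cs : List Char) (k : Nat)
    (hk : (cs.drop k).head? = some d) (hmin : ∀ i, i < k → (cs.drop i).head? ≠ some d) :
    cs.takeWhile (fun c => !decide (c = d)) = cs.take k := by
  induction cs generalizing k with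
  | nil => simp at hk
  | cons c rest ih =>
    cases k with
    | zero =>
      simp at hk
      simp [List.takeWhile_cons, hk]
    | succ k' =>
      have hc : c ≠ d := by
        have := hmin 0 (by omega)
        simpa using this
      simp only [List.take_succ_cons, List.takeWhile_cons, hc, decide_false, Bool.not_false, if_true]
      rw [ih k' (by simpa using hk) (fun i hi => by simpa using hmin (i + 1) (by omega))]

theorem singleton_prefix_iff (d : Char) (l : List Char) : [d] <+: l ↔ l.head? = some d := by
  cases l with
  | nil => simp
  | cons x t =>
    constructor
    · rintro ⟨r, hr⟩
      simp at hr
      simp [hr.1]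
    · intro h
      simp at h
      exact ⟨t, by simp [h]⟩

theorem pathA_eq_pathB (cs : List Char) :
    (if 0 ≤ PySem.Chars.find cs ['?'] then
        PySem.Chars.slice cs none (some (PySem.Chars.find cs ['?'])) else cs) =
      (splitCh '?' cs).headI := by
  rw [splitCh_headI_takeWhile]
  by_cases hq : 0 ≤ PySem.Chars.find cs ['?']
  · simp only [hq, if_true]
    obtain ⟨hpre, hmin⟩ := PySem.Chars.find_spec hq
    rw [PySem.Chars.slice_eq_listSlice, PySem.List.slice_to cs hq]
    exact Eq.symm <| takeWhile_eq_take '?' cs (PySem.Chars.find cs ['?']).toNat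
      ((singleton_prefix_iff _ _).mp hpre)
      (fun i hi h => hmin i hi ((singleton_prefix_iff _ _).mpr h))
  · simp only [hq, if_false]
    have hne : PySem.Chars.find cs ['?'] = -1 := by
      have := PySem.Chars.neg_one_le_find cs ['?']
      omega
    have hnotmem : '?' ∉ cs := fun hm =>
      ((PySem.Chars.find_eq_neg_one_iff cs ['?']).mp hne) ((singleton_infix_iff '?' cs).mpr hm)
    rw [List.takeWhile_eq_self_iff.mpr]
    intro c hc
    simp only [Bool.not_eq_true', decide_eq_false_iff_not]
    exact fun h => hnotmem (h ▸ hc)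

def mapPlus (cs : List Char) : List Char := cs.map (fun c => if c = '+' then ' ' else c)

def decM (p : List Char) : List Char :=
  match p with
  | a :: b :: rest =>
    match hexByte? a b with
    | some ch => ch :: mapPlus rest
    | none => '%' :: mapPlus p
  | _ => '%' :: mapPlus p

def udBspec (cs : List Char) : List Char :=
  match splitCh '%' cs with
  | [] => []
  | first :: parts => mapPlus first ++ parts.flatMap decM

theorem udBspec_nil : udBspec [] = [] := rfl

theorem udLoopA_nil : udLoopA [] = [] := by simp [udLoopA]

theorem udLoopA_plus (rest : List Char) : udLoopA ('+' :: rest) = ' ' :: udLoopA rest := by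
  rw [udLoopA.eq_def]; simp

theorem udLoopA_ord (c : Char) (h1 : c ≠ '+') (h2 : c ≠ '%') (rest : List Char) :
    udLoopA (c :: rest) = c :: udLoopA rest := by
  rw [udLoopA.eq_def]; simp [h1, h2]

theorem udLoopA_pct_nil : udLoopA ['%'] = ['%'] := by
  rw [udLoopA.eq_def]; simp [udLoopA_nil]

theorem udLoopA_pct_one (a : Char) : udLoopA ['%', a] = '%' :: udLoopA [a] := by
  rw [udLoopA.eq_def]; simp

theorem udLoopA_pct_some (a b : Char) (rest2 : List Char) (ch : Char)
    (hx : hexByte? a b = some ch) :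
    udLoopA ('%' :: a :: b :: rest2) = ch :: udLoopA rest2 := by
  rw [udLoopA.eq_def]; simp [hx]

theorem udLoopA_pct_none (a b : Char) (rest2 : List Char) (hx : hexByte? a b = none) :
    udLoopA ('%' :: a :: b :: rest2) = '%' :: udLoopA (a :: b :: rest2) := by
  rw [udLoopA.eq_def]; simp [hx]

theorem udBspec_cons_ne (c : Char) (hc : c ≠ '%') (rest : List Char) :
    udBspec (c :: rest) = (if c = '+' then ' ' else c) :: udBspec rest := by
  rcases hs : splitCh '%' rest with _ | ⟨h1, t⟩
  · exact absurd hs (splitCh_ne_nil '%' rest)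
  · simp [udBspec, splitCh, hc, hs, mapPlus]

theorem udBspec_pct (rest h1 : List Char) (t : List (List Char)) (hs : splitCh '%' rest = h1 :: t) :
    udBspec ('%' :: rest) = decM h1 ++ t.flatMap decM := by
  simp [udBspec, splitCh, hs, mapPlus]

theorem udBspec_of_split (rest h1 : List Char) (t : List (List Char)) (hs : splitCh '%' rest = h1 :: t) :
    udBspec rest = mapPlus h1 ++ t.flatMap decM := by
  simp [udBspec, hs]

theorem decM_none (a b : Char) (r : List Char) (hx : hexByte? a b = none) :
    decM (a :: b :: r) = '%' :: mapPlus (a :: b :: r) := by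
  have h0 : decM (a :: b :: r) =
      match hexByte? a b with
      | some ch => ch :: mapPlus r
      | none => '%' :: mapPlus (a :: b :: r) := rfl
  rw [h0, hx]

theorem decM_some (a b : Char) (r : List Char) (ch : Char) (hx : hexByte? a b = some ch) :
    decM (a :: b :: r) = ch :: mapPlus r := by
  have h0 : decM (a :: b :: r) =
      match hexByte? a b with
      | some ch => ch :: mapPlus r
      | none => '%' :: mapPlus (a :: b :: r) := rfl
  rw [h0, hx]

theorem decM_literal (p : List Char) (h : ∀ a b r, p = a :: b :: r → hexByte? a b = none) :
    decM p = '%' :: mapPlus p := by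
  match p with
  | [] => rfl
  | [a] => rfl
  | a :: b :: r => exact decM_none a b r (h a b r rfl)

theorem splitCh_cons_ne (d c : Char) (hc : c ≠ d) (rest h1 : List Char) (t : List (List Char))
    (hs : splitCh d rest = h1 :: t) : splitCh d (c :: rest) = (c :: h1) :: t := by
  simp [splitCh, hc, hs]

theorem splitCh_cons_eq (d : Char) (l : List Char) :
    splitCh d (d :: l) = [] :: splitCh d l := by
  simp [splitCh]

theorem udA_eq_udBspec (cs : List Char) (hdom : ∀ c ∈ cs, pvDomChar c = true) :
    udLoopA cs = udBspec cs := by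
  match cs with
  | [] => rw [udLoopA_nil, udBspec_nil]
  | c :: rest =>
    have hdr : ∀ x ∈ rest, pvDomChar x = true := fun x hx => hdom x (List.mem_cons_of_mem _ hx)
    have ihrest := udA_eq_udBspec rest hdr
    by_cases hp : c = '+'
    · subst hp
      rw [udLoopA_plus, udBspec_cons_ne '+' (by decide) rest, if_pos rfl, ihrest]
    by_cases hpc : c = '%'
    case neg =>
      rw [udLoopA_ord c hp hpc, udBspec_cons_ne c hpc rest, if_neg hp, ihrest]
    subst hpc
    match hrest : rest with
    | [] =>
      rw [udLoopA_pct_nil]; rfl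
    | [a] =>
      rw [udLoopA_pct_one a, ihrest]
      by_cases ha : a = '%'
      · subst ha; rfl
      · have hsa : splitCh '%' [a] = [[a]] := by simp [splitCh, ha]
        rw [udBspec_pct [a] [a] [] hsa, udBspec_of_split [a] [a] [] hsa,
            decM_literal [a] (by intro x y r h; simp at h)]
        rfl
    | a :: b :: r2 =>
      have hda : pvDomChar a = true := hdom a (by simp)
      have hdb : pvDomChar b = true := hdom b (by simp)
      rcases hs : splitCh '%' (a :: b :: r2) with _ | ⟨h1, t⟩
      · exact absurd hs (splitCh_ne_nil '%' _)
      rcases hx : hexByte? a b with _ | ch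
      · -- int raises ValueError: the '%' stays literal and scanning resumes at a
        have hlit : decM h1 = '%' :: mapPlus h1 := by
          apply decM_literal
          intro x y r hxy
          have hsc := hs
          by_cases hA : a = '%'
          · subst hA
            rw [splitCh_cons_eq '%' (b :: r2)] at hsc
            injection hsc with e1 e2
            rw [← e1] at hxy; cases hxy
          by_cases hB : b = '%'
          · subst hB
            rw [splitCh_cons_ne '%' a hA ('%' :: r2) [] (splitCh '%' r2)
                (splitCh_cons_eq '%' r2)] at hsc
            injection hsc with e1 e2
            rw [← e1] at hxy; simp at hxy
          · rcases h2 : splitCh '%' r2 with _ | ⟨h2h, h2t⟩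
            · exact absurd h2 (splitCh_ne_nil '%' _)
            rw [splitCh_cons_ne '%' a hA _ _ _ (splitCh_cons_ne '%' b hB r2 h2h h2t h2)] at hsc
            injection hsc with e1 e2
            rw [← e1] at hxy
            simp only [List.cons.injEq] at hxy
            obtain ⟨rfl, rfl, -⟩ := hxy
            exact hx
        rw [udLoopA_pct_none a b r2 hx, ihrest, udBspec_pct _ h1 t hs,
            udBspec_of_split _ h1 t hs, hlit, List.cons_append]
      · -- decode succeeds: neither a nor b can be '%'
        have hA : a ≠ '%' := fun h => by
          rw [h, hexByte?_pct_left b (dom_lt_128 b hdb)] at hx; cases hx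
        have hB : b ≠ '%' := fun h => by
          rw [h, hexByte?_pct_right a (dom_lt_128 a hda)] at hx; cases hx
        rcases h2 : splitCh '%' r2 with _ | ⟨h2h, h2t⟩
        · exact absurd h2 (splitCh_ne_nil '%' _)
        have hsc := hs
        rw [splitCh_cons_ne '%' a hA _ _ _ (splitCh_cons_ne '%' b hB r2 h2h h2t h2)] at hsc
        injection hsc with e1 e2
        have ihr2 := udA_eq_udBspec r2 (fun x hx2 => hdom x (by simp [hx2]))
        rw [udLoopA_pct_some a b r2 ch hx, ihr2, udBspec_pct _ h1 t hs, ← e1,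
            decM_some a b h2h ch hx, udBspec_of_split r2 h2h h2t h2, ← e2, List.cons_append]
termination_by cs.length
decreasing_by all_goals (subst_vars; simp [List.length_cons]; try omega)

theorem decFragB_eq_decM : decFragB = decM := by
  funext p
  match p with
  | [] => rfl
  | [a] =>
    rw [show decFragB [a] = '%' :: plusToSpace [a] from rfl,
        show decM [a] = '%' :: mapPlus [a] from rfl]
    simp only [plusToSpace, plusToSpace_eq_map, mapPlus]
  | a :: b :: r =>
    have h0 : decFragB (a :: b :: r) =
        match hexByte? a b with
        | some ch => ch :: plusToSpace r
        | none => '%' :: plusToSpace (a :: b :: r) := rfl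
    rcases hx : hexByte? a b with _ | ch
    · rw [h0, hx, decM_none a b r hx]
      simp only [plusToSpace, plusToSpace_eq_map, mapPlus]
    · rw [h0, hx, decM_some a b r ch hx]
      simp only [plusToSpace, plusToSpace_eq_map, mapPlus]

theorem url_decodeB_eq_spec (cs : List Char) : url_decodeB cs = udBspec cs := by
  rw [url_decodeB, udBspec, splitOn_singleton, decFragB_eq_decM]
  rcases hs : splitCh '%' cs with _ | ⟨h1, t⟩
  · exact absurd hs (splitCh_ne_nil '%' cs)
  · simp only [plusToSpace, plusToSpace_eq_map, mapPlus]

theorem udLoopA_id (cs : List Char) (h1 : '%' ∉ cs) (h2 : '+' ∉ cs) : udLoopA cs = cs := by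
  induction cs with
  | nil => exact udLoopA_nil
  | cons c rest ih =>
    have hc1 : c ≠ '%' := fun h => h1 (h ▸ List.mem_cons_self ..)
    have hc2 : c ≠ '+' := fun h => h2 (h ▸ List.mem_cons_self ..)
    rw [udLoopA_ord c hc2 hc1 rest,
      ih (fun h => h1 (List.mem_cons_of_mem _ h)) (fun h => h2 (List.mem_cons_of_mem _ h))]

theorem url_decodeA_eq_decodeB (cs : List Char) (hdom : ∀ c ∈ cs, pvDomChar c = true) :
    url_decodeA cs = url_decodeB cs := by
  rw [url_decodeB_eq_spec, url_decodeA]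
  split
  case isTrue h =>
    simp only [Bool.and_eq_true, Bool.not_eq_true'] at h
    have h1 : '%' ∉ cs := fun hm =>
      (PySem.Chars.isIn_eq_false_iff _ _).mp h.1 ((singleton_infix_iff '%' cs).mpr hm)
    have h2 : '+' ∉ cs := fun hm =>
      (PySem.Chars.isIn_eq_false_iff _ _).mp h.2 ((singleton_infix_iff '+' cs).mpr hm)
    rw [← udA_eq_udBspec cs hdom, udLoopA_id cs h1 h2]
  case isFalse h => exact udA_eq_udBspec cs hdom

theorem segLoopA_spec (raw : List (List Char)) (out : List String)
    (hdom : ∀ seg ∈ raw, ∀ c ∈ seg, pvDomChar c = true) :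
    segLoopA raw out =
      (if ['.', '.'] ∈ raw.filter (fun seg => !decide (seg = [] ∨ seg = ['.'])) then none
       else some (out ++ (raw.filter (fun seg => !decide (seg = [] ∨ seg = ['.']))).map
          (fun seg => String.ofList (url_decodeB seg)))) := by
  induction raw generalizing out with
  | nil => simp [segLoopA]
  | cons seg rest ih =>
    have hdr : ∀ s ∈ rest, ∀ c ∈ s, pvDomChar c = true :=
      fun s hs => hdom s (List.mem_cons_of_mem _ hs)
    by_cases hskip : seg = [] ∨ seg = ['.']
    · have hpred : (!decide (seg = [] ∨ seg = ['.'])) = false := by simp [hskip]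
      rw [show segLoopA (seg :: rest) out = segLoopA rest out by simp [segLoopA, hskip],
          ih out hdr, List.filter_cons, hpred]
      simp
    · by_cases hdd : seg = ['.', '.']
      · subst hdd
        rw [show segLoopA (['.', '.'] :: rest) out = none by simp [segLoopA],
            List.filter_cons]
        simp
      · have hpred : (!decide (seg = [] ∨ seg = ['.'])) = true := by simp [hskip]
        have hmem : (['.', '.'] ∈ seg :: List.filter (fun s => !decide (s = [] ∨ s = ['.'])) rest)
            ↔ (['.', '.'] ∈ List.filter (fun s => !decide (s = [] ∨ s = ['.'])) rest) := by
          simp only [List.mem_cons]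
          exact or_iff_right (fun h => hdd h.symm)
        rw [show segLoopA (seg :: rest) out
              = segLoopA rest (out ++ [String.ofList (url_decodeA seg)]) by
            simp [segLoopA, hskip, hdd],
          ih _ hdr, url_decodeA_eq_decodeB seg (hdom seg (List.mem_cons_self ..)),
          List.filter_cons, hpred]
        simp only [if_true]
        rw [if_congr hmem rfl rfl]
        split
        · rfl
        · simp [List.append_assoc]

theorem headI_mem {α : Type} [Inhabited α] (l : List α) (h : l ≠ []) : l.headI ∈ l := by
  cases l with
  | nil => exact absurd rfl h
  | cons a t => simp

-- ===== VERDICT (by name: the statement is the Claim_ definition above) =====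
theorem split_url_segments_spec : Claim_equal_split_url_segments := by
  intro up hdom
  unfold Spec_split_url_segments
  have hdomc : ∀ c ∈ up.toList, pvDomChar c = true := by
    simpa [Dom_split_url_segments, pvDomStr, List.all_eq_true] using hdom
  simp only [split_url_segments, split_url_segments_alt]
  rw [splitOn_singleton '?' up.toList, pathA_eq_pathB up.toList]
  have hpath : ∀ c ∈ (splitCh '?' up.toList).headI, pvDomChar c = true := fun c hc =>
    hdomc c (mem_splitCh '?' up.toList _ (headI_mem _ (splitCh_ne_nil '?' up.toList)) c hc)
  rw [splitOn_singleton '/' ((splitCh '?' up.toList).headI)]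
  rw [segLoopA_spec _ [] (fun seg hseg c hc =>
    hpath c (mem_splitCh '/' _ seg hseg c hc))]
  simp
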